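-- pv_equiv track=rewrite | github.com/bborkmiller/spelling-bee | spelling_bee.py | format_two_letter_list
-- ===== SOURCE A (Python) =====
-- def format_two_letter_list(tll, only_nonzero=False):
--     """Format a TLL into a string for printing"""
--
--     if only_nonzero:
--         tll = {k: v for (k, v) in tll.items() if v > 0}
--
--     if len(tll) == 0:
--         tll_output = "No combos to display"
--
--     else:
--         tll_output = ""
--         prev_key = sorted(tll)[0]
--         for key in sorted(tll):
--             if key[0] != prev_key[0]:
--                 tll_output += "\n"
--             tll_output += f"{key}-{tll[key]} "
--             prev_key = key
--
--     return tll_output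
-- ===== SOURCE B (Python) =====
-- def format_two_letter_list(tll, only_nonzero=False):
--     """Format a TLL into a string for printing"""
--
--     if only_nonzero:
--         tll = {k: v for (k, v) in tll.items() if v > 0}
--
--     if len(tll) == 0:
--         return "No combos to display"
--
--     keys = sorted(tll)
--     return "\n".join(
--         "".join(f"{k}-{tll[k]} " for k in g) for g in _groups(keys)
--     )
--
--
-- def _groups(keys):
--     """Split a sorted key list into maximal runs sharing the same first character."""
--     if not keys:
--         return []
--     i = 1
--     while i < len(keys) and keys[i][0] == keys[0][0]:
--         i += 1
--     return [keys[:i]] + _groups(keys[i:])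
-- ===== Notes on version B (the rewrite author's own statement) =====
-- stated objective: idiomatic
-- what changed: A's single pass with prev_key boundary tracking and string concatenation is replaced by explicitly grouping the sorted keys into runs sharing the same first character and ' '-joining the rendered groups.
import Mathlib
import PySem

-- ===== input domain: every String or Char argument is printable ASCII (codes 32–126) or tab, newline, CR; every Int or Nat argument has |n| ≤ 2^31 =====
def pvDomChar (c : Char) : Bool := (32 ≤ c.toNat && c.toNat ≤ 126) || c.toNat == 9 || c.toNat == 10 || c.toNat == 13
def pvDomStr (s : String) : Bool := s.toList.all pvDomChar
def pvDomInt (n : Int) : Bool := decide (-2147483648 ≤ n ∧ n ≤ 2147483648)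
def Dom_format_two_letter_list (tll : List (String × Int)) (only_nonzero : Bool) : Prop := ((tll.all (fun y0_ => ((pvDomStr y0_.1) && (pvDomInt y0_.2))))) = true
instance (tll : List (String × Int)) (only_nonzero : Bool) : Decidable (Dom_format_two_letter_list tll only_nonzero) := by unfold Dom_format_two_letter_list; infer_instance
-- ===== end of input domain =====

-- B replaces A's prev_key boundary tracking by an explicit grouping of the sorted keys by
-- first character and a '\n'-join of the rendered groups (objective: simpler decomposition).

-- shared helpers: both Pythons contain the same dict-building lines and the same f-string
-- key[0] as an Option (none exactly where Python's IndexError would fire; excluded by Pre_)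
def pvHc (s : String) : Option Char := s.toList.head?

-- f"{key}-{tll[key]} " rendered as chars ('{tll[key]}' = str of the dict value; the key is
-- always present, so the .getD 0 default is never consulted)
def pvEntry (d : PySem.Dict String Int) (key : String) : List Char :=
  key.toList ++ '-' :: PySem.Int.toChars ((PySem.Dict.get? d key).getD 0) ++ [' ']

-- ===== PORT A =====
-- the for-loop over sorted(tll) with prev_key tracking; out is the accumulated tll_output
def pvLoopA (d : PySem.Dict String Int) : List String → String → List Char → List Char
  | [], _, out => out
  | k :: ks, prev, out =>
      pvLoopA d ks k ((if pvHc k ≠ pvHc prev then out ++ ['\n'] else out) ++ pvEntry d k)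

def format_two_letter_list (tll : List (String × Int)) (only_nonzero : Bool) : String :=
  let d0 := PySem.Dict.ofList tll
  let d := if only_nonzero then PySem.Dict.ofList (d0.items.filter (fun p => decide (0 < p.2))) else d0
  if PySem.Dict.size d = 0 then "No combos to display"
  else
    match PySem.List.sorted (PySem.Dict.keys d) (fun k => k) false with
    | [] => ""        -- unreachable: the dict is nonempty here
    | k0 :: rest => String.ofList (pvLoopA d (k0 :: rest) k0 [])  -- prev_key = sorted(tll)[0]

-- ===== PORT B =====
-- _groups of Source B: split the sorted key list into maximal runs sharing the first character
def pvGroupsB : List String → List (List String)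
  | [] => []
  | k :: ks =>
      (k :: ks.takeWhile (fun x => pvHc x == pvHc k)) ::
        pvGroupsB (ks.dropWhile (fun x => pvHc x == pvHc k))
  termination_by ks => ks.length
  decreasing_by exact Nat.lt_succ_of_le (List.length_dropWhile_le _ _)

-- "".join(f"{k}-{tll[k]} " for k in g)
def pvRender (d : PySem.Dict String Int) (g : List String) : List Char :=
  (g.map (pvEntry d)).flatten

def format_two_letter_list_alt (tll : List (String × Int)) (only_nonzero : Bool) : String :=
  let d0 := PySem.Dict.ofList tll
  let d := if only_nonzero then PySem.Dict.ofList (d0.items.filter (fun p => decide (0 < p.2))) else d0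
  if PySem.Dict.size d = 0 then "No combos to display"
  else
    let ks := PySem.List.sorted (PySem.Dict.keys d) (fun k => k) false
    String.ofList (PySem.Chars.join ['\n'] ((pvGroupsB ks).map (pvRender d)))  -- "\n".join(...)

-- ===== PRECONDITION & SPEC =====
-- Pre_ excludes exactly the inputs where Python A raises IndexError: the (filtered) dict
-- contains the empty-string key, whose key[0] Python cannot take.
def Pre_format_two_letter_list (tll : List (String × Int)) (only_nonzero : Bool) : Prop :=
  PySem.Dict.contains (PySem.Dict.ofList tll) "" = true →
    (only_nonzero = true ∧ PySem.Dict.getD (PySem.Dict.ofList tll) "" 0 ≤ 0)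
instance (tll : List (String × Int)) (only_nonzero : Bool) : Decidable (Pre_format_two_letter_list tll only_nonzero) := by unfold Pre_format_two_letter_list; infer_instance

def pvWitness_format_two_letter_list : (List (String × Int)) × Bool :=
  ([("aa", 1), ("ab", 2), ("ba", 3)], false)

def Spec_format_two_letter_list (tll : List (String × Int)) (only_nonzero : Bool) (out : String) : Prop := out = format_two_letter_list_alt tll only_nonzero
instance (tll : List (String × Int)) (only_nonzero : Bool) (out : String) : Decidable (Spec_format_two_letter_list tll only_nonzero out) := by unfold Spec_format_two_letter_list; infer_instance

-- ===== CLAIM (what is proved, stated in full; the proofs are below) =====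
def Claim_equal_format_two_letter_list : Prop := ∀ (tll : List (String × Int)) (only_nonzero : Bool), Dom_format_two_letter_list tll only_nonzero → Pre_format_two_letter_list tll only_nonzero → Spec_format_two_letter_list tll only_nonzero (format_two_letter_list tll only_nonzero)

-- ===== LEMMAS AND PROOFS =====

-- B's joined output, as a function of the sorted key list
def pvJ (d : PySem.Dict String Int) (ks : List String) : List Char :=
  PySem.Chars.join ['\n'] ((pvGroupsB ks).map (pvRender d))

theorem pvLoopA_append (d : PySem.Dict String Int) (ks : List String) (prev : String)
    (out : List Char) : pvLoopA d ks prev out = out ++ pvLoopA d ks prev [] := by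
  induction ks generalizing prev out with
  | nil => simp [pvLoopA]
  | cons k ks ih =>
      have h1 := ih k ((if pvHc k ≠ pvHc prev then out ++ ['\n'] else out) ++ pvEntry d k)
      have h2 := ih k ((if pvHc k ≠ pvHc prev then ([] : List Char) ++ ['\n'] else []) ++ pvEntry d k)
      simp only [pvLoopA]
      rw [h1, h2]
      split_ifs <;> simp

theorem pvJ_cons (d : PySem.Dict String Int) (k : String) (ks : List String) :
    pvJ d (k :: ks) =
      pvRender d (k :: ks.takeWhile (fun x => pvHc x == pvHc k)) ++
        (if ks.dropWhile (fun x => pvHc x == pvHc k) = [] then []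
         else '\n' :: pvJ d (ks.dropWhile (fun x => pvHc x == pvHc k))) := by
  rw [pvJ, pvGroupsB]
  cases h : ks.dropWhile (fun x => pvHc x == pvHc k) with
  | nil => simp [pvGroupsB, PySem.Chars.join_singleton]
  | cons r rs =>
      simp only [List.map_cons]
      rw [pvGroupsB, List.map_cons, PySem.Chars.join_cons_cons, pvJ, pvGroupsB]
      simp

theorem pvRunS (d : PySem.Dict String Int) (ks : List String) :
    ∀ (c : Option Char) (prev : String), pvHc prev = c →
      pvLoopA d ks prev [] =
        ((ks.takeWhile (fun x => pvHc x == c)).map (pvEntry d)).flatten ++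
          (if ks.dropWhile (fun x => pvHc x == c) = [] then []
           else '\n' :: pvJ d (ks.dropWhile (fun x => pvHc x == c))) := by
  induction ks with
  | nil => intro c prev _; simp [pvLoopA]
  | cons x ks ih =>
      intro c prev hprev
      by_cases hx : pvHc x = c
      · have htw : (x :: ks).takeWhile (fun x => pvHc x == c) =
            x :: ks.takeWhile (fun x => pvHc x == c) := by
          simp [hx]
        have hdw : (x :: ks).dropWhile (fun x => pvHc x == c) =
            ks.dropWhile (fun x => pvHc x == c) := by
          simp [hx]
        rw [htw, hdw]
        simp only [pvLoopA, hx, hprev, ne_eq, not_true_eq_false, if_false, List.nil_append]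
        rw [pvLoopA_append, ih c x hx]
        simp
      · have htw : (x :: ks).takeWhile (fun x => pvHc x == c) = [] := by
          simp [hx]
        have hdw : (x :: ks).dropWhile (fun x => pvHc x == c) = x :: ks := by
          simp [hx]
        rw [htw, hdw]
        have hne : pvHc x ≠ pvHc prev := by rw [hprev]; exact hx
        simp only [pvLoopA, hne, if_pos, List.nil_append, List.map_nil, List.flatten_nil,
          List.cons_ne_nil, if_neg, reduceIte]
        rw [pvLoopA_append, pvJ_cons]
        simp only [pvRender, List.map_cons, List.flatten_cons]
        rw [ih (pvHc x) x rfl]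
        simp [pvRender, hne]

theorem pvMain (d : PySem.Dict String Int) (k0 : String) (rest : List String) :
    pvLoopA d (k0 :: rest) k0 [] = pvJ d (k0 :: rest) := by
  rw [pvRunS d (k0 :: rest) (pvHc k0) k0 rfl, pvJ_cons]
  simp [pvRender]

-- ===== VERDICT (by name: the statement is the Claim_ definition above) =====
theorem format_two_letter_list_spec : Claim_equal_format_two_letter_list := by
  intro tll only_nonzero _ _
  unfold Spec_format_two_letter_list format_two_letter_list format_two_letter_list_alt
  simp only []
  set d0 := PySem.Dict.ofList tll
  set d := if only_nonzero then PySem.Dict.ofList (d0.items.filter (fun p => decide (0 < p.2))) else d0 with hd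
  by_cases hsz : PySem.Dict.size d = 0
  · simp [hsz]
  · simp only [hsz, if_false]
    cases h : PySem.List.sorted (PySem.Dict.keys d) (fun k => k) false with
    | nil => simp [pvGroupsB, PySem.Chars.join, List.intercalate, List.intersperse]
    | cons k0 rest =>
        show String.ofList (pvLoopA d (k0 :: rest) k0 []) =
          String.ofList (PySem.Chars.join ['\n'] ((pvGroupsB (k0 :: rest)).map (pvRender d)))
        rw [pvMain]
        rfl
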